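-- pv_equiv track=rewrite | github.com/anderssonlab/DeepCompARE | Scripts_python/seq_ops.py | shuffle_dinucleotides
-- ===== SOURCE A (Python) =====
-- def shuffle_dinucleotides(seq):
--     evens = seq[0::2]
--     odds = seq[1::2]
--     zipped_pairs = zip(odds, evens)
--     shuffled_sequence = ''.join(a + b for a, b in zipped_pairs)
--     # Handle the case where the original sequence length is odd
--     if len(seq) % 2 != 0:
--         shuffled_sequence += seq[-1]
--     return shuffled_sequence
-- ===== SOURCE B (Python) =====
-- def shuffle_dinucleotides(seq):
--     lst = list(seq)
--     for i in range(1, len(lst), 2):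
--         lst[i - 1], lst[i] = lst[i], lst[i - 1]
--     return ''.join(lst)
-- ===== Notes on version B (the rewrite author's own statement) =====
-- stated objective: alternative
-- what changed: B keeps one mutable buffer and swaps adjacent elements in place over range(1, len, 2), instead of A's split into two stride-2 slices, zip and re-interleave via join.
import Mathlib
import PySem

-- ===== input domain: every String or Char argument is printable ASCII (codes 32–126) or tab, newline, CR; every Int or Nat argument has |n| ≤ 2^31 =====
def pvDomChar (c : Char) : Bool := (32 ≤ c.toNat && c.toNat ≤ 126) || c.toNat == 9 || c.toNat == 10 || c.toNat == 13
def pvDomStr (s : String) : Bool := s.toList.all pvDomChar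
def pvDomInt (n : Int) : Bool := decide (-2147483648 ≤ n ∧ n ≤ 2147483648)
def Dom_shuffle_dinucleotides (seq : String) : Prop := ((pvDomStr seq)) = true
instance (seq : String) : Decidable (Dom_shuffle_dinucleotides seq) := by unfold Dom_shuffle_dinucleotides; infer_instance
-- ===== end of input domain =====

-- B swaps adjacent characters in one buffer over range(1, len, 2) instead of A's
-- split-into-two-stride-2-slices + zip + join; same O(n) cost, different decomposition.

-- ===== PORT A =====
def shuffle_dinucleotides (seq : String) : String :=
  let s := seq.toList
  let evens := (PySem.List.slice? s (some 0) none 2).getD []      -- seq[0::2]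
  let odds := (PySem.List.slice? s (some 1) none 2).getD []       -- seq[1::2]
  let zipped_pairs := odds.zip evens                              -- zip(odds, evens)
  let shuffled := PySem.Str.join "" (zipped_pairs.map (fun p => String.ofList [p.1, p.2]))
  if s.length % 2 ≠ 0 then
    shuffled ++ String.ofList (PySem.List.pyGet? s (-1)).toList   -- seq[-1]; never none when the length is odd
  else shuffled

-- ===== PORT B =====
def shuffle_dinucleotides_alt (seq : String) : String :=
  let lst := seq.toList                                           -- lst = list(seq)
  let lst := (PySem.List.pyRange 1 (lst.length : Int) 2).foldl    -- for i in range(1, len(lst), 2)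
    (fun l i =>
      match PySem.List.pyGet? l i, PySem.List.pyGet? l (i - 1) with
      | some b, some a => (l.set (i - 1).toNat b).set i.toNat a   -- lst[i-1], lst[i] = lst[i], lst[i-1]
      | _, _ => l)                                                -- unreachable: i and i-1 are in range
    lst
  String.ofList lst                                               -- ''.join(lst)

-- ===== PRECONDITION & SPEC =====
def Spec_shuffle_dinucleotides (seq : String) (out : String) : Prop := out = shuffle_dinucleotides_alt seq
instance (seq : String) (out : String) : Decidable (Spec_shuffle_dinucleotides seq out) := by unfold Spec_shuffle_dinucleotides; infer_instance

-- ===== CLAIM (what is proved, stated in full; the proofs are below) =====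
def Claim_equal_shuffle_dinucleotides : Prop := ∀ (seq : String), Dom_shuffle_dinucleotides seq → Spec_shuffle_dinucleotides seq (shuffle_dinucleotides seq)

-- ===== LEMMAS AND PROOFS =====

-- the common normal form both ports compute: swap adjacent pairs
def pvSwap {α : Type} : List α → List α
  | [] => []
  | [a] => [a]
  | a :: b :: t => b :: a :: pvSwap t

def pvEvens {α : Type} : List α → List α
  | [] => []
  | [a] => [a]
  | a :: _ :: t => a :: pvEvens t

theorem pvEvens_cons_tail {α : Type} (b : α) (t : List α) :
    pvEvens (b :: t) = b :: pvEvens t.tail := by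
  cases t <;> simp [pvEvens]

theorem pvFmEv {α : Type} : ∀ (s : List α),
    (List.range ((s.length + 1) / 2)).filterMap (fun k => s[2 * k]?) = pvEvens s
  | [] => by simp [pvEvens]
  | [a] => by simp [pvEvens, List.range_succ]
  | a :: b :: t => by
    have h2 : ((a :: b :: t).length + 1) / 2 = ((t.length + 1) / 2) + 1 := by
      simp only [List.length_cons]; omega
    rw [h2, List.range_succ_eq_map, List.filterMap_cons, List.filterMap_map]
    have hz : (2 : ℕ) * 0 = 0 := rfl
    simp only [hz, List.getElem?_cons_zero]
    have hs : ∀ k ∈ List.range ((t.length + 1) / 2),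
        ((fun k => (a :: b :: t)[2 * k]?) ∘ Nat.succ) k = (fun k => t[2 * k]?) k := by
      intro k _
      simp only [Function.comp]
      rw [show 2 * Nat.succ k = 2 * k + 1 + 1 by omega]
      simp
    rw [List.filterMap_congr hs, pvFmEv t]
    simp [pvEvens]

theorem pvFmOd {α : Type} : ∀ (s : List α),
    (List.range (s.length / 2)).filterMap (fun k => s[2 * k + 1]?) = pvEvens s.tail
  | [] => by simp [pvEvens]
  | [a] => by simp [pvEvens]
  | a :: b :: t => by
    have h2 : (a :: b :: t).length / 2 = t.length / 2 + 1 := by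
      simp only [List.length_cons]; omega
    rw [h2, List.range_succ_eq_map, List.filterMap_cons, List.filterMap_map]
    have hz : (2 : ℕ) * 0 + 1 = 1 := rfl
    simp only [hz, List.getElem?_cons_succ, List.getElem?_cons_zero]
    have hs : ∀ k ∈ List.range (t.length / 2),
        ((fun k => (b :: t)[2 * k]?) ∘ Nat.succ) k = (fun k => t[2 * k + 1]?) k := by
      intro k _
      simp only [Function.comp]
      rw [show 2 * Nat.succ k = 2 * k + 1 + 1 by omega]
      simp
    rw [List.filterMap_congr hs, pvFmOd t]
    rw [show (a :: b :: t).tail = b :: t from rfl, pvEvens_cons_tail]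

theorem pvSlice2_zero {α : Type} (s : List α) :
    PySem.List.slice? s (some 0) none 2 = some (pvEvens s) := by
  have hcount : (if 0 < s.length then (((s.length : ℤ) + 2 - 1) / 2).toNat else 0) = (s.length + 1) / 2 := by
    split <;> omega
  have hidx : ∀ k : ℕ, ((2 * (k : ℤ)).toNat) = 2 * k := by intro k; omega
  simp only [PySem.List.slice?, PySem.List.sliceIndices]
  norm_num
  rw [hcount]
  simp only [hidx]
  exact pvFmEv s

theorem pvSlice2_one {α : Type} (s : List α) :
    PySem.List.slice? s (some 1) none 2 = some (pvEvens s.tail) := by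
  cases s with
  | nil => simp [PySem.List.slice?, PySem.List.sliceIndices, pvEvens]
  | cons a t =>
    have hcount : (if 0 < t.length then (((t.length : ℤ) + 2 - 1) / 2).toNat else 0)
        = (a :: t).length / 2 := by
      simp only [List.length_cons]; split <;> omega
    have hidx : ∀ k : ℕ, ((1 + 2 * (k : ℤ)).toNat) = 2 * k + 1 := by intro k; omega
    simp only [PySem.List.slice?, PySem.List.sliceIndices]
    norm_num
    rw [hcount]
    simp only [hidx]
    exact pvFmOd (a :: t)

theorem pvA_core {α : Type} : ∀ (s : List α),
    (((pvEvens s.tail).zip (pvEvens s)).map (fun p => [p.1, p.2])).flatten ++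
      (if s.length % 2 ≠ 0 then s.getLast?.toList else []) = pvSwap s
  | [] => by simp [pvEvens, pvSwap]
  | [a] => by simp [pvEvens, pvSwap]
  | a :: b :: t => by
    have ih := pvA_core t
    rw [show (a :: b :: t).tail = b :: t from rfl, pvEvens_cons_tail,
        show pvEvens (a :: b :: t) = a :: pvEvens t from rfl]
    simp only [List.zip_cons_cons, List.map_cons, List.flatten_cons]
    rw [show (a :: b :: t).length = t.length + 2 by simp,
        show (t.length + 2) % 2 = t.length % 2 by omega]
    cases t with
    | nil => simp [pvSwap, pvEvens]
    | cons c t' =>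
      rw [List.getLast?_cons_cons, List.getLast?_cons_cons]
      simp only [pvSwap]
      rw [← ih]
      simp

theorem pvFlatInter : ∀ (ls : List (List Char)), (List.intersperse ([] : List Char) ls).flatten = ls.flatten
  | [] => rfl
  | [x] => rfl
  | x :: y :: t => by
    rw [show List.intersperse ([] : List Char) (x :: y :: t)
        = x :: [] :: List.intersperse [] (y :: t) from rfl]
    simp [pvFlatInter (y :: t)]

theorem pvJoinNil (ls : List (List Char)) : PySem.Chars.join [] ls = ls.flatten := by
  have h := pvFlatInter ls
  simpa [PySem.Chars.join, List.intercalate] using h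

theorem pvA_eq (seq : String) :
    shuffle_dinucleotides seq = String.ofList (pvSwap seq.toList) := by
  simp only [shuffle_dinucleotides, pvSlice2_zero, pvSlice2_one, Option.getD_some]
  set s := seq.toList with hset
  have hcomp : (String.toList ∘ fun p : Char × Char => String.ofList [p.1, p.2])
      = fun p : Char × Char => [p.1, p.2] := by
    funext p; simp
  by_cases h : s.length % 2 ≠ 0
  · rw [if_pos h]
    refine String.toList_inj.mp ?_
    have hc := pvA_core s
    rw [if_pos h] at hc
    simp only [String.toList_append, PySem.Str.toList_join, List.map_map, hcomp,
      String.toList_ofList, PySem.List.pyGet?_neg_one]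
    rw [show ("" : String).toList = [] from rfl, pvJoinNil]
    exact hc
  · rw [if_neg h]
    refine String.toList_inj.mp ?_
    have hc := pvA_core s
    rw [if_neg h, List.append_nil] at hc
    simp only [PySem.Str.toList_join, List.map_map, hcomp, String.toList_ofList]
    rw [show ("" : String).toList = [] from rfl, pvJoinNil]
    exact hc

-- ===== B side =====
def pvSwapStep (l : List Char) (i : Int) : List Char :=
  match PySem.List.pyGet? l i, PySem.List.pyGet? l (i - 1) with
  | some b, some a => (l.set (i - 1).toNat b).set i.toNat a
  | _, _ => l

theorem pvRange2 (n : ℕ) :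
    PySem.List.pyRange 1 (n : ℤ) 2 = (List.range (n / 2)).map (fun (k : ℕ) => 2 * (k : ℤ) + 1) := by
  rw [PySem.List.pyRange_of_pos 1 (n : ℤ) (by norm_num)]
  have hc : (if (1 : ℤ) < (n : ℤ) then (((n : ℤ) - 1 + 2 - 1) / 2).toNat else 0) = n / 2 := by
    split <;> omega
  rw [hc]
  apply List.map_congr_left
  intro k _
  ring

theorem pvShift (k : ℕ) (x y : Char) (l : List Char) :
    pvSwapStep (x :: y :: l) (2 * (k : ℤ) + 1 + 2) = x :: y :: pvSwapStep l (2 * (k : ℤ) + 1) := by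
  unfold pvSwapStep
  rw [show (2 * (k : ℤ) + 1 + 2) = ((2 * k + 3 : ℕ) : ℤ) by push_cast; ring]
  rw [show ((2 * k + 3 : ℕ) : ℤ) - 1 = ((2 * k + 2 : ℕ) : ℤ) by push_cast; ring]
  rw [show (2 * (k : ℤ) + 1) = ((2 * k + 1 : ℕ) : ℤ) by push_cast; ring]
  rw [show ((2 * k + 1 : ℕ) : ℤ) - 1 = ((2 * k : ℕ) : ℤ) by push_cast; ring]
  simp only [PySem.List.pyGet?_natCast, Int.toNat_natCast]
  have g1 : (x :: y :: l)[2 * k + 3]? = l[2 * k + 1]? := by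
    rw [show 2 * k + 3 = (2 * k + 1) + 1 + 1 by omega]; simp
  have g2 : (x :: y :: l)[2 * k + 2]? = l[2 * k]? := by
    rw [show 2 * k + 2 = 2 * k + 1 + 1 by omega]; simp
  rw [g1, g2]
  cases hb : l[2 * k + 1]? <;> cases ha : l[2 * k]?
  case none.none => rfl
  case none.some => rfl
  case some.none => rfl
  case some.some =>
    rw [show 2 * k + 2 = (2 * k) + 1 + 1 by omega, show 2 * k + 3 = (2 * k + 1) + 1 + 1 by omega]
    simp [List.set_cons_succ]

theorem pvFoldShift (r : List ℕ) : ∀ (x y : Char) (l : List Char),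
    r.foldl (fun (l : List Char) (k : ℕ) => pvSwapStep l (2 * (k : ℤ) + 1 + 2)) (x :: y :: l)
      = x :: y :: r.foldl (fun (l : List Char) (k : ℕ) => pvSwapStep l (2 * (k : ℤ) + 1)) l := by
  induction r with
  | nil => intro x y l; rfl
  | cons k r ih =>
    intro x y l
    simp only [List.foldl_cons]
    rw [pvShift k x y l]
    exact ih x y _

theorem pvB_fold : ∀ (s : List Char),
    (List.range (s.length / 2)).foldl (fun (l : List Char) (k : ℕ) => pvSwapStep l (2 * (k : ℤ) + 1)) s = pvSwap s
  | [] => by simp [pvSwap]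
  | [a] => by norm_num [pvSwap]
  | a :: b :: t => by
    have h2 : (a :: b :: t).length / 2 = t.length / 2 + 1 := by
      simp only [List.length_cons]; omega
    have h0 : pvSwapStep (a :: b :: t) (2 * ((0 : ℕ) : ℤ) + 1) = b :: a :: t := by
      have e1 : PySem.List.pyGet? (a :: b :: t) (2 * ((0 : ℕ) : ℤ) + 1) = some b := by
        rw [show 2 * ((0 : ℕ) : ℤ) + 1 = ((1 : ℕ) : ℤ) by norm_num, PySem.List.pyGet?_natCast]
        simp
      have e0 : PySem.List.pyGet? (a :: b :: t) (2 * ((0 : ℕ) : ℤ) + 1 - 1) = some a := by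
        rw [show 2 * ((0 : ℕ) : ℤ) + 1 - 1 = ((0 : ℕ) : ℤ) by norm_num, PySem.List.pyGet?_natCast]
        simp
      unfold pvSwapStep
      rw [e1, e0]
      simp
    have hfun : (fun (x : List Char) (y : ℕ) => pvSwapStep x (2 * ((Nat.succ y : ℕ) : ℤ) + 1))
        = fun (x : List Char) (y : ℕ) => pvSwapStep x (2 * (y : ℤ) + 1 + 2) := by
      funext x y; congr 1
    rw [h2, List.range_succ_eq_map]
    simp only [List.foldl_cons, List.foldl_map]
    rw [h0, hfun, pvFoldShift, pvB_fold t]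
    rfl

theorem pvB_core (s : List Char) :
    (PySem.List.pyRange 1 ((s.length : ℕ) : ℤ) 2).foldl
      (fun l i =>
        match PySem.List.pyGet? l i, PySem.List.pyGet? l (i - 1) with
        | some b, some a => (l.set (i - 1).toNat b).set i.toNat a
        | _, _ => l) s = pvSwap s := by
  have hfun : (fun (l : List Char) (i : ℤ) =>
      match PySem.List.pyGet? l i, PySem.List.pyGet? l (i - 1) with
      | some b, some a => (l.set (i - 1).toNat b).set i.toNat a
      | _, _ => l) = pvSwapStep := rfl
  rw [hfun, pvRange2, List.foldl_map]
  exact pvB_fold s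

theorem pvB_eq (seq : String) :
    shuffle_dinucleotides_alt seq = String.ofList (pvSwap seq.toList) := by
  simp only [shuffle_dinucleotides_alt]
  rw [pvB_core]

-- ===== VERDICT (by name: the statement is the Claim_ definition above) =====
theorem shuffle_dinucleotides_spec : Claim_equal_shuffle_dinucleotides := by
  intro seq _
  unfold Spec_shuffle_dinucleotides
  rw [pvA_eq, pvB_eq]
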